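-- pv_equiv track=rewrite | github.com/sophiallen/wordsearch | wordSearchFinal.py | vtSearch
-- ===== SOURCE A (Python) =====
-- def vtSearch(matrix, row, ndx):
--     '''Given starting coordinates within a matrix, searches for possible
--     words vertically, returns list of possibilities'''
--     #again, start with letter at given coordinates, and initialize list to hold possible words.
--     word = matrix[row][ndx]
--     found = []
--
--     #based on the row given, find out how many rows are beneath it.
--     lng = len(matrix) - row
--
--     #for each row beneath the starting row,
--     for i in range(1,lng):
--         #add the letter that's in the same column from that row to the base word
--         word += matrix[row+i][ndx]
--         #append that word to the list.
--         found.append(word)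
--
--     #return list of possible words.
--     return found
-- ===== SOURCE B (Python) =====
-- def vtSearch(matrix, row, ndx):
--     '''Given starting coordinates within a matrix, searches for possible
--     words vertically, returns list of possibilities'''
--     # Build the whole vertical column first (the starting letter, then the
--     # letters below it), then emit its prefixes of length >= 2.
--     letters = [matrix[row][ndx]] + [r[ndx] for r in matrix[row:][1:]]
--     return [''.join(letters[:k]) for k in range(2, len(letters) + 1)]
-- ===== Notes on version B (the rewrite author's own statement) =====
-- stated objective: simpler
-- what changed: Replaces the running concat-and-append accumulator loop with a build-then-slice decomposition: first materialise the column letter list from the row suffix, then emit each prefix of length >= 2 by a comprehension over prefix lengths.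
-- intended difference: On negative start rows A's loop bound len(matrix)-row overshoots, so A wraps past the bottom and returns len(matrix) extra words built from wrapped re-read rows (e.g. ['bc','bca','bcab','bcabc'] for row=-2 of a 3-row column); B treats a negative row as Python's from-the-end index and scans only down to the bottom (['bc']), the intended vertical scan. — e.g. on vtSearch([["a"], ["b"], ["c"]], -2, 0): A returns ["bc", "bca", "bcab", "bcabc"], B returns ["bc"]
import Mathlib
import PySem

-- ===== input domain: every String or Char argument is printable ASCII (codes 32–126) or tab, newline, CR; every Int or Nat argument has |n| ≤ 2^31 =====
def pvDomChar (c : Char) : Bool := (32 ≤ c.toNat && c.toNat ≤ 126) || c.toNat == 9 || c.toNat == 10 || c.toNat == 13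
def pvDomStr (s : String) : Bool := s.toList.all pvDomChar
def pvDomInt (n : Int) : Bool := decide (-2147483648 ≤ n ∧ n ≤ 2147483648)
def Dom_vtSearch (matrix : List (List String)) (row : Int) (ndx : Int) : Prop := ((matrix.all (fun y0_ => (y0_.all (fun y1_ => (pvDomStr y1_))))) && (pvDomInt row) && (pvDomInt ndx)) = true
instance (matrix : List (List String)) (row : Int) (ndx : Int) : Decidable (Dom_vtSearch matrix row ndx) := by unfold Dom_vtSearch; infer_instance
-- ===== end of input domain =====

-- B builds the column letter list first and returns its length-≥2 prefixes, instead of A's running concat-and-append accumulator loop (objective: simpler).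


-- ===== PORT A =====
def vtSearch (matrix : List (List String)) (row : Int) (ndx : Int) : List String :=
  -- word = matrix[row][ndx]  (pyGetD is exact under Pre_: both indexings are in range there)
  let word := PySem.List.pyGetD (PySem.List.pyGetD matrix row []) ndx ""
  -- lng = len(matrix) - row
  let lng : Int := (matrix.length : Int) - row
  -- for i in range(1, lng): word += matrix[row+i][ndx]; found.append(word)
  ((PySem.List.pyRange 1 lng 1).foldl
    (fun (st : String × List String) i =>
      let w := st.1 ++ PySem.List.pyGetD (PySem.List.pyGetD matrix (row + i) []) ndx ""
      (w, st.2 ++ [w]))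
    (word, [])).2

-- ===== PORT B =====
def vtSearch_alt (matrix : List (List String)) (row : Int) (ndx : Int) : List String :=
  -- letters = [matrix[row][ndx]] + [r[ndx] for r in matrix[row:][1:]]
  let letters := PySem.List.pyGetD (PySem.List.pyGetD matrix row []) ndx ""
    :: (PySem.List.slice (PySem.List.slice matrix (some row) none) (some 1) none).map
        (fun r => PySem.List.pyGetD r ndx "")
  -- [''.join(letters[:k]) for k in range(2, len(letters) + 1)]
  (PySem.List.pyRange 2 ((letters.length : Int) + 1) 1).map
    (fun k => PySem.Str.join "" (PySem.List.slice letters none (some k)))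

-- ===== PRECONDITION & SPEC =====
-- Pre_ excludes exactly the inputs where A raises IndexError: a start row outside [-len(matrix), len(matrix))
-- or a column index ndx out of range (Python semantics, negatives wrap) for some row the scan reads
-- (rows row..bottom for a nonnegative start row; every row for a negative one, since A's loop wraps).
def Pre_vtSearch (matrix : List (List String)) (row : Int) (ndx : Int) : Prop :=
  (0 ≤ row ∧ row < (matrix.length : Int) ∧
      ∀ r ∈ matrix.drop row.toNat, PySem.Raise.InRange r.length ndx)
  ∨ (-(matrix.length : Int) ≤ row ∧ row < 0 ∧
      ∀ r ∈ matrix, PySem.Raise.InRange r.length ndx)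
instance (matrix : List (List String)) (row : Int) (ndx : Int) : Decidable (Pre_vtSearch matrix row ndx) := by unfold Pre_vtSearch; infer_instance
def pvWitness_vtSearch : List (List String) × Int × Int := ([["a"], ["b"], ["c"]], 0, 0)

-- On a negative start row, A's loop bound len(matrix)-row overshoots, so A wraps past the bottom and
-- returns extra words that re-read wrapped rows; B treats a negative row as Python's usual from-the-end
-- index and scans only down to the bottom, which is the intended vertical scan.
def D_vtSearch (matrix : List (List String)) (row : Int) (ndx : Int) : Prop := row < 0
instance (matrix : List (List String)) (row : Int) (ndx : Int) : Decidable (D_vtSearch matrix row ndx) := by unfold D_vtSearch; infer_instance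

def Spec_vtSearch (matrix : List (List String)) (row : Int) (ndx : Int) (out : List String) : Prop := ¬ D_vtSearch matrix row ndx → out = vtSearch_alt matrix row ndx
instance (matrix : List (List String)) (row : Int) (ndx : Int) (out : List String) : Decidable (Spec_vtSearch matrix row ndx out) := by unfold Spec_vtSearch; infer_instance

def pvDiffWitness_vtSearch : List (List String) × Int × Int := ([["a"], ["b"], ["c"]], -2, 0)
def pvDiffWitnessOut_vtSearch : (List String) × (List String) := (["bc", "bca", "bcab", "bcabc"], ["bc"])

-- ===== CLAIM (what is proved, stated in full; the proofs are below) =====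
def Claim_unchanged_vtSearch : Prop := ∀ (matrix : List (List String)) (row : Int) (ndx : Int), Dom_vtSearch matrix row ndx → Pre_vtSearch matrix row ndx → Spec_vtSearch matrix row ndx (vtSearch matrix row ndx)
def Claim_exact_vtSearch : Prop := ∀ (matrix : List (List String)) (row : Int) (ndx : Int), Dom_vtSearch matrix row ndx → Pre_vtSearch matrix row ndx → D_vtSearch matrix row ndx → vtSearch matrix row ndx ≠ vtSearch_alt matrix row ndx
def Claim_changed_vtSearch : Prop := Dom_vtSearch (pvDiffWitness_vtSearch.1) (pvDiffWitness_vtSearch.2.1) (pvDiffWitness_vtSearch.2.2) ∧ Pre_vtSearch (pvDiffWitness_vtSearch.1) (pvDiffWitness_vtSearch.2.1) (pvDiffWitness_vtSearch.2.2) ∧ D_vtSearch (pvDiffWitness_vtSearch.1) (pvDiffWitness_vtSearch.2.1) (pvDiffWitness_vtSearch.2.2) ∧ vtSearch (pvDiffWitness_vtSearch.1) (pvDiffWitness_vtSearch.2.1) (pvDiffWitness_vtSearch.2.2) = pvDiffWitnessOut_vtSearch.1 ∧ vtSearch_alt (pvDiffWitness_vtSearch.1) (pvDiffWitness_vtSearch.2.1)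 (pvDiffWitness_vtSearch.2.2) = pvDiffWitnessOut_vtSearch.2 ∧ pvDiffWitnessOut_vtSearch.1 ≠ pvDiffWitnessOut_vtSearch.2

-- ===== LEMMAS AND PROOFS =====

-- ''.join of a nonempty list with empty separator peels off the head.
lemma join_empty_cons (c : String) (l : List String) :
    PySem.Str.join "" (c :: l) = c ++ PySem.Str.join "" l := by
  apply String.toList_inj.mp
  simp [PySem.Str.toList_join]
  cases l with
  | nil => simp [PySem.Chars.join, List.intercalate]
  | cons b t => simp [PySem.Chars.join_cons_cons]

lemma join_empty_nil : PySem.Str.join "" ([] : List String) = "" := by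
  apply String.toList_inj.mp
  simp [PySem.Str.toList_join, PySem.Chars.join, List.intercalate]

-- A's loop, run over the list of letters below the start, collects w-prefixed joins.
lemma scan_foldl (L : List String) :
    ∀ (w : String) (acc : List String),
      (L.foldl (fun (st : String × List String) c =>
          (st.1 ++ c, st.2 ++ [st.1 ++ c])) (w, acc)).2
        = acc ++ (List.range L.length).map
            (fun j => w ++ PySem.Str.join "" (L.take (j + 1))) := by
  induction L with
  | nil => simp
  | cons c L ih =>
    intro w acc
    simp only [List.foldl_cons, List.length_cons, List.range_succ_eq_map, List.map_cons,
      List.map_map, List.take_succ_cons, join_empty_cons, ih]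
    simp [Function.comp_def, String.append_assoc, join_empty_nil]

-- indexing the whole list by a range recovers the list
lemma map_range_getD {α : Type} (L : List α) (d : α) :
    (List.range L.length).map (fun k => L.getD k d) = L := by
  apply List.ext_getElem
  · simp
  · intro i h1 h2
    simp [List.getD_eq_getElem?_getD, List.getElem?_eq_getElem h2]

-- folding over the indices of L with lookups is folding over L
lemma foldl_range_getD {α β : Type} (L : List α) (d : α) (g : β → α → β) (init : β) :
    (List.range L.length).foldl (fun st k => g st (L.getD k d)) init = L.foldl g init := by
  conv_rhs => rw [← map_range_getD L d]
  rw [List.foldl_map]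

theorem vtSearch_spec : Claim_unchanged_vtSearch := by
  intro matrix row ndx _ hpre
  unfold Spec_vtSearch
  intro hnd
  unfold D_vtSearch at hnd
  have h0 : (0 : Int) ≤ row := Int.not_lt.mp hnd
  obtain ⟨-, h1, -⟩ | ⟨-, hneg, -⟩ := hpre
  swap
  · omega
  obtain ⟨r, rfl⟩ : ∃ r : ℕ, row = (r : Int) := ⟨row.toNat, (Int.toNat_of_nonneg h0).symm⟩
  have hr : r < matrix.length := by exact_mod_cast h1
  have hdrop : matrix.drop r = matrix[r] :: matrix.drop (r + 1) := List.drop_eq_getElem_cons hr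
  -- the common column data
  set c : String := PySem.List.pyGetD matrix[r] ndx "" with hc
  set rest : List String := (matrix.drop (r + 1)).map (fun rw => PySem.List.pyGetD rw ndx "") with hrest
  have hrestlen : rest.length = matrix.length - (r + 1) := by simp [hrest]
  have hword : PySem.List.pyGetD (PySem.List.pyGetD matrix (r : Int) []) ndx "" = c := by
    rw [PySem.List.pyGetD_natCast, List.getD_eq_getElem?_getD, List.getElem?_eq_getElem hr]
    rfl
  -- B reduces to the prefix-join form
  have hB : vtSearch_alt matrix (r : Int) ndx
      = (List.range rest.length).map
          (fun j => c ++ PySem.Str.join "" (rest.take (j + 1))) := by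
    unfold vtSearch_alt
    rw [PySem.List.slice_from_natCast, hdrop, PySem.List.slice_from_one, List.tail_cons, hword]
    simp only [List.length_cons]
    have hlen : (((((matrix.drop (r+1)).map (fun rw => PySem.List.pyGetD rw ndx "")).length + 1 : ℕ) : Int) + 1 - 2).toNat = rest.length := by
      rw [show rest.length = ((matrix.drop (r+1)).map (fun rw => PySem.List.pyGetD rw ndx "")).length from rfl]
      omega
    rw [PySem.List.pyRange_one, hlen, List.map_map]
    apply List.map_congr_left
    intro k hk
    have h2k : (0:Int) ≤ 2 + (k : Int) := by positivity
    simp only [Function.comp_apply, PySem.List.slice_to _ h2k]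
    have : ((2 : Int) + (k : Int)).toNat = k + 2 := by omega
    rw [this]
    rw [show (k + 2) = (k + 1) + 1 by omega, List.take_succ_cons, join_empty_cons]
  -- A reduces to the same form
  have hA : vtSearch matrix (r : Int) ndx
      = (List.range rest.length).map
          (fun j => c ++ PySem.Str.join "" (rest.take (j + 1))) := by
    unfold vtSearch
    dsimp only
    have hlng : (((matrix.length : Int) - r) - 1).toNat = rest.length := by
      rw [hrestlen]; omega
    rw [PySem.List.pyRange_one, hlng, List.foldl_map, hword]
    have hbody : ∀ (st : String × List String), ∀ k ∈ List.range rest.length,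
        (fun (st : String × List String) (i : Int) =>
          let w := st.1 ++ PySem.List.pyGetD (PySem.List.pyGetD matrix ((r : Int) + i) []) ndx ""
          (w, st.2 ++ [w])) st (1 + (k : Int))
        = (fun (st : String × List String) (k : ℕ) =>
            (st.1 ++ rest.getD k "", st.2 ++ [st.1 ++ rest.getD k ""])) st k := by
      intro st k hk
      have hk' : k < rest.length := List.mem_range.mp hk
      have hcell : PySem.List.pyGetD (PySem.List.pyGetD matrix ((r : Int) + (1 + (k : Int))) []) ndx ""
          = rest.getD k "" := by
        have hik : (r : Int) + (1 + (k : Int)) = ((r + 1 + k : ℕ) : Int) := by push_cast; ring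
        have hlt : r + 1 + k < matrix.length := by omega
        rw [hik, PySem.List.pyGetD_natCast, List.getD_eq_getElem?_getD,
          List.getElem?_eq_getElem hlt, hrest]
        have hk2 : k < (matrix.drop (r+1)).length := by simp; omega
        rw [List.getD_eq_getElem?_getD, List.getElem?_eq_getElem (by simpa using hk2)]
        simp only [List.getElem_map, List.getElem_drop, Option.getD_some]
      simp only [hcell]
    rw [PySem.List.foldl_congr_mem _ _ _ _ hbody]
    rw [show (List.range rest.length).foldl
          (fun (st : String × List String) (k : ℕ) =>
            (st.1 ++ rest.getD k "", st.2 ++ [st.1 ++ rest.getD k ""])) (c, ([] : List String))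
        = rest.foldl (fun (st : String × List String) x =>
            (st.1 ++ x, st.2 ++ [st.1 ++ x])) (c, []) from
      foldl_range_getD rest "" (fun st x => (st.1 ++ x, st.2 ++ [st.1 ++ x])) (c, [])]
    rw [scan_foldl]
    simp
  rw [hA, hB]

-- A's loop emits one word per scanned row, whatever the rows hold.
lemma scan_len {ι : Type} (xs : List ι) (g : ι → String) :
    ∀ (w : String) (acc : List String),
      ((xs.foldl (fun (st : String × List String) i =>
          (st.1 ++ g i, st.2 ++ [st.1 ++ g i])) (w, acc)).2).length
        = acc.length + xs.length := by
  induction xs with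
  | nil => simp
  | cons x xs ih =>
    intro w acc
    simp only [List.foldl_cons, ih]
    simp
    omega

theorem vtSearch_changed : Claim_changed_vtSearch := by
  unfold Claim_changed_vtSearch
  decide

theorem vtSearch_tight : Claim_exact_vtSearch := by
  intro matrix row ndx _ hpre hd heq
  unfold D_vtSearch at hd
  obtain ⟨h0, -, -⟩ | ⟨hge, -, -⟩ := hpre
  · omega
  obtain ⟨k, rfl, hk1, hk2⟩ : ∃ k : ℕ, row = -(k : Int) ∧ 1 ≤ k ∧ k ≤ matrix.length :=
    ⟨(-row).toNat, by omega, by omega, by omega⟩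
  have hA : (vtSearch matrix (-(k : Int)) ndx).length = matrix.length + k - 1 := by
    unfold vtSearch
    dsimp only
    rw [scan_len]
    simp [PySem.List.length_pyRange_one]
    omega
  have hB : (vtSearch_alt matrix (-(k : Int)) ndx).length = k - 1 := by
    unfold vtSearch_alt
    dsimp only
    rw [PySem.List.slice_from_neg_natCast matrix k (by omega), PySem.List.slice_from_one]
    simp [PySem.List.length_pyRange_one]
    omega
  have := congrArg List.length heq
  rw [hA, hB] at this
  omega
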